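-- pv_equiv track=rewrite | github.com/lorserker/ben | src/bidding/bidding.py | get_contract
-- ===== SOURCE A (Python) =====
-- def is_contract(bid):
--     return bid[0].isdigit()
--
-- def get_contract(auction):
--
--     contract = None
--     doubled = False
--     redoubled = False
--     last_bid_i = None
--     for i in reversed(range(len(auction))):
--         bid = auction[i]
--         if is_contract(bid):
--             contract = bid
--             last_bid_i = i
--             break
--         if bid == 'X':
--             doubled = True
--         if bid == 'XX':
--             redoubled = True
--
--     if contract is None:
--         return None
--
--     declarer_i = None
--     for i in range(last_bid_i + 1):
--         bid = auction[i]
--         if not is_contract(bid):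
--             continue
--         if (i + last_bid_i) % 2 != 0:
--             continue
--         if bid[1] != contract[1]:
--             continue
--         declarer_i = i
--         break
--
--     declarer = ['N', 'E', 'S', 'W'][declarer_i % 4]
--
--     xx = '' if not doubled else 'X' if not redoubled else 'XX'
--
--     return contract + xx + declarer
-- ===== SOURCE B (Python) =====
-- SEATS = ['N', 'E', 'S', 'W']
--
-- def get_contract(auction):
--     contract = None
--     last_bid_i = None
--     doubled = False
--     redoubled = False
--     first_seen = {}
--     for i, bid in enumerate(auction):
--         if bid[0].isdigit():
--             contract = bid
--             last_bid_i = i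
--             doubled = False
--             redoubled = False
--             key = (bid[1], i % 2)
--             if key not in first_seen:
--                 first_seen[key] = i
--         elif bid == 'X':
--             doubled = True
--         elif bid == 'XX':
--             redoubled = True
--     if contract is None:
--         return None
--     declarer_i = first_seen[(contract[1], last_bid_i % 2)]
--     xx = 'X' if doubled and not redoubled else 'XX' if doubled and redoubled else ''
--     return contract + xx + SEATS[declarer_i % 4]
-- ===== Notes on version B (the rewrite author's own statement) =====
-- stated objective: alternative
-- what changed: Replaces A's two passes (a reverse scan for the last contract plus a forward rescan for the declarer) by a single forward pass that resets the doubled/redoubled flags at each contract bid and records in a dict the first index at which each (strain, partnership-parity) key was bid, so the declarer is a single dict lookup.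
-- outside the precondition, e.g. on get_contract(['1', '2C']): A returns '2CE', B raises IndexError
import Mathlib
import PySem

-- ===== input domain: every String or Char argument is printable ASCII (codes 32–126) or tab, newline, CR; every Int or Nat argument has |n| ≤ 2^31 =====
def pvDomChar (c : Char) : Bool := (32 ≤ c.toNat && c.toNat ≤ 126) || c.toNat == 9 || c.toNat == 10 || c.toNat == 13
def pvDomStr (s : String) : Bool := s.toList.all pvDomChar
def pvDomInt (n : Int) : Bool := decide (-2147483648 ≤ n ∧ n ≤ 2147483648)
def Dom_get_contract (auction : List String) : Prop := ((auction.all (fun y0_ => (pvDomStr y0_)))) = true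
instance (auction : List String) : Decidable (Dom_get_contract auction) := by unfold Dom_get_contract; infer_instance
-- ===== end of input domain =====

-- B replaces A's reverse scan + forward rescan by one forward pass with a first-index table; same cost, different decomposition.

-- ===== PORT A =====
def pvIsContract (bid : String) : Bool :=   -- is_contract: bid[0].isdigit() (empty bid raises in Python; excluded by Pre_)
  match PySem.Str.pyGet? bid 0 with
  | some c => PySem.Chars.isdigit c
  | none => false

-- the 'for i in reversed(range(len(auction)))' loop with its break and X/XX flag accumulation
def pvRevScan (auction : List String) : List Int → Bool → Bool → Option (String × Int) × Bool × Bool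
  | [], doubled, redoubled => (none, doubled, redoubled)
  | i :: rest, doubled, redoubled =>
    let bid := PySem.List.pyGetD auction i ""
    if pvIsContract bid then (some (bid, i), doubled, redoubled)
    else pvRevScan auction rest (if bid == "X" then true else doubled)
           (if bid == "XX" then true else redoubled)

-- the 'for i in range(last_bid_i + 1)' declarer search with its continues and break
def pvFwdScan (auction : List String) (contract : String) (last_bid_i : Int) : List Int → Option Int
  | [] => none
  | i :: rest =>
    let bid := PySem.List.pyGetD auction i ""
    if ¬ pvIsContract bid then pvFwdScan auction contract last_bid_i rest
    else if PySem.Int.mod (i + last_bid_i) 2 ≠ 0 then pvFwdScan auction contract last_bid_i rest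
    else if PySem.Str.pyGet? bid 1 ≠ PySem.Str.pyGet? contract 1 then
      pvFwdScan auction contract last_bid_i rest
    else some i

def get_contract (auction : List String) : Option String :=
  let res := pvRevScan auction ((PySem.List.pyRange 0 auction.length 1).reverse) false false
  match res.1 with
  | none => none
  | some (contract, last_bid_i) =>
    let declarer_i := (pvFwdScan auction contract last_bid_i
        (PySem.List.pyRange 0 (last_bid_i + 1) 1)).getD 0
    let declarer := PySem.List.pyGetD ["N", "E", "S", "W"] (PySem.Int.mod declarer_i 4) ""
    let xx := if !res.2.1 then "" else if !res.2.2 then "X" else "XX"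
    some (contract ++ xx ++ declarer)

-- ===== PORT B =====
def pvSeats : List String := ["N", "E", "S", "W"]

-- one forward step of B: contract/flags update plus the first-seen (strain, i % 2) table
def pvStep (st : Option (String × Int) × Bool × Bool × PySem.Dict (Option Char × Int) Int)
    (p : Int × String) : Option (String × Int) × Bool × Bool × PySem.Dict (Option Char × Int) Int :=
  if ((PySem.Str.pyGet? p.2 0).map PySem.Chars.isdigit).getD false then
    let key := (PySem.Str.pyGet? p.2 1, PySem.Int.mod p.1 2)
    (some (p.2, p.1), false, false,
      if (st.2.2.2.get? key).isSome then st.2.2.2 else st.2.2.2.insert key p.1)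
  else if p.2 == "X" then (st.1, true, st.2.2.1, st.2.2.2)
  else if p.2 == "XX" then (st.1, st.2.1, true, st.2.2.2)
  else st

def get_contract_alt (auction : List String) : Option String :=
  let st := (PySem.List.enumerate auction 0).foldl pvStep (none, false, false, PySem.Dict.empty)
  match st.1 with
  | none => none
  | some (contract, last_bid_i) =>
    let declarer_i := (st.2.2.2.get? (PySem.Str.pyGet? contract 1,
        PySem.Int.mod last_bid_i 2)).getD 0
    let xx := if st.2.1 && !st.2.2.1 then "X" else if st.2.1 && st.2.2.1 then "XX" else ""
    some (contract ++ xx ++ PySem.List.pyGetD pvSeats (PySem.Int.mod declarer_i 4) "")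

-- ===== PRECONDITION & SPEC =====
-- Pre_ excludes auctions with an empty bid or a digit-initial bid of length 1 (malformed calls on
-- which Python indexes bid[0]/bid[1] out of range): A raises IndexError there except when the
-- length-1 bid sits at a parity the declarer loop skips, where A still returns; B raises IndexError
-- on all of them (it indexes bid[1] eagerly).
def Pre_get_contract (auction : List String) : Prop :=
  ∀ bid ∈ auction, 1 ≤ bid.length ∧ (PySem.Chars.isdigit bid.toList.headI = true → 2 ≤ bid.length)
instance (auction : List String) : Decidable (Pre_get_contract auction) := by
  unfold Pre_get_contract; infer_instance
def pvWitness_get_contract : List String := ["PASS", "1C", "X", "XX", "3N", "PASS", "PASS", "PASS"]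
def Spec_get_contract (auction : List String) (out : Option String) : Prop := out = get_contract_alt auction
instance (auction : List String) (out : Option String) : Decidable (Spec_get_contract auction out) := by unfold Spec_get_contract; infer_instance

-- ===== CLAIM (what is proved, stated in full; the proofs are below) =====
def Claim_equal_get_contract : Prop := ∀ (auction : List String), Dom_get_contract auction → Pre_get_contract auction → Spec_get_contract auction (get_contract auction)

-- ===== LEMMAS AND PROOFS =====

-- B's bid[0].isdigit() test computes A's is_contract
theorem pvStep_contract_eq (bid : String) :
    ((PySem.Str.pyGet? bid 0).map PySem.Chars.isdigit).getD false = pvIsContract bid := by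
  unfold pvIsContract
  cases PySem.Str.pyGet? bid 0 <;> simp

-- the state reached by B's fold
def pvBState (xs : List String) : Option (String × Int) × Bool × Bool × PySem.Dict (Option Char × Int) Int :=
  (PySem.List.enumerate xs 0).foldl pvStep (none, false, false, PySem.Dict.empty)

-- the result of A's reverse scan over the whole auction
def pvAState (xs : List String) : Option (String × Int) × Bool × Bool :=
  pvRevScan xs ((PySem.List.pyRange 0 xs.length 1).reverse) false false

-- the key B files a contract bid at index i under
def pvKeyAt (xs : List String) (i : Nat) : Option (Option Char × Int) :=
  let bid := xs.getD i ""
  if pvIsContract bid then some (PySem.Str.pyGet? bid 1, PySem.Int.mod i 2) else none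

-- flags thread through pvRevScan by disjunction
theorem pvRevScan_flags (xs : List String) (idxs : List Int) (d r : Bool) :
    pvRevScan xs idxs d r = ((pvRevScan xs idxs false false).1,
      d || (pvRevScan xs idxs false false).2.1, r || (pvRevScan xs idxs false false).2.2) := by
  induction idxs generalizing d r with
  | nil => simp [pvRevScan]
  | cons i rest ih =>
    simp only [pvRevScan]
    by_cases hc : pvIsContract (PySem.List.pyGetD xs i "") = true
    · simp [hc]
    · simp only [Bool.not_eq_true] at hc
      simp only [hc, Bool.false_eq_true, if_false]
      have h1 := ih (if PySem.List.pyGetD xs i "" == "X" then true else d)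
        (if PySem.List.pyGetD xs i "" == "XX" then true else r)
      have h2 := ih (if PySem.List.pyGetD xs i "" == "X" then true else false)
        (if PySem.List.pyGetD xs i "" == "XX" then true else false)
      rw [h1, h2]
      by_cases hx : PySem.List.pyGetD xs i "" = "X"
      · simp [hx]
      · by_cases hxx : PySem.List.pyGetD xs i "" = "XX" <;> simp [hx, hxx]

-- pvRevScan only reads indices below xs.length, so a new last element is invisible
theorem pvRevScan_append (xs : List String) (x : String) (idxs : List Int)
    (h : ∀ i ∈ idxs, 0 ≤ i ∧ i < (xs.length : Int)) (d r : Bool) :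
    pvRevScan (xs ++ [x]) idxs d r = pvRevScan xs idxs d r := by
  induction idxs generalizing d r with
  | nil => rfl
  | cons i rest ih =>
    have hi := h i (by simp)
    have hget : PySem.List.pyGetD (xs ++ [x]) i "" = PySem.List.pyGetD xs i "" := by
      rw [PySem.List.pyGetD_eq_getElem (xs ++ [x]) "" hi.1 (by simp; omega),
        PySem.List.pyGetD_eq_getElem xs "" hi.1 hi.2]
      exact List.getElem_append_left (by omega)
    simp only [pvRevScan, hget]
    split
    · rfl
    · exact ih (fun j hj => h j (List.mem_cons_of_mem _ hj)) _ _

-- the coupling invariant between B's fold state and A's reverse scan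
def pvInv (xs : List String) : Prop :=
  (pvBState xs).1 = (pvAState xs).1 ∧
  (pvBState xs).2.1 = (pvAState xs).2.1 ∧
  (pvBState xs).2.2.1 = (pvAState xs).2.2 ∧
  (∀ k, (pvBState xs).2.2.2.get? k =
    ((List.range xs.length).find? (fun i => pvKeyAt xs i == some k)).map (fun i => (i : Int))) ∧
  (∀ c L, (pvBState xs).1 = some (c, L) → ∃ Ln : Nat, L = (Ln : Int) ∧ Ln < xs.length ∧
    xs.getD Ln "" = c ∧ pvIsContract c = true ∧
    ∀ i : Nat, Ln < i → i < xs.length → pvIsContract (xs.getD i "") = false)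

theorem pvFind?_congr {α : Type} (l : List α) (p q : α → Bool)
    (h : ∀ a ∈ l, p a = q a) : l.find? p = l.find? q := by
  induction l with
  | nil => rfl
  | cons a t ih =>
    simp only [List.find?_cons, h a (List.mem_cons_self)]
    cases q a
    · exact ih (fun b hb => h b (List.mem_cons_of_mem _ hb))
    · rfl

theorem pvBState_append (xs : List String) (x : String) :
    pvBState (xs ++ [x]) = pvStep (pvBState xs) ((xs.length : Int), x) := by
  unfold pvBState
  rw [PySem.List.enumerate_append, List.foldl_append]
  simp [PySem.List.enumerate_cons, PySem.List.enumerate_nil]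

theorem pvAState_append (xs : List String) (x : String) :
    pvAState (xs ++ [x]) =
      if pvIsContract x then (some (x, (xs.length : Int)), false, false)
      else pvRevScan (xs ++ [x]) ((PySem.List.pyRange 0 (xs.length : Int) 1).reverse)
        (if x == "X" then true else false) (if x == "XX" then true else false) := by
  unfold pvAState
  have h1 : ((xs ++ [x]).length : Int) = (xs.length : Int) + 1 := by simp
  rw [h1, PySem.List.pyRange_one_succ_right (by positivity), List.reverse_append]
  have hget : PySem.List.pyGetD (xs ++ [x]) (xs.length : Int) "" = x := by
    rw [PySem.List.pyGetD_eq_getElem (xs ++ [x]) "" (by positivity) (by simp)]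
    simp
  simp only [List.reverse_singleton, List.singleton_append, pvRevScan, hget]

theorem pvInv_holds (xs : List String) : pvInv xs := by
  induction xs using List.reverseRecOn with
  | nil =>
    refine ⟨rfl, rfl, rfl, fun k => ?_, fun c L h => by simp [pvBState] at h⟩
    simp [pvBState, PySem.Dict.get?_empty]
  | append_singleton xs x ih =>
    obtain ⟨ih1, ih2, ih3, ihd, ihL⟩ := ih
    have hn := pvBState_append xs x
    have hA := pvAState_append xs x
    have hgetlt : ∀ i : Nat, i < xs.length → (xs ++ [x]).getD i "" = xs.getD i "" := by
      intro i hi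
      rw [List.getD_eq_getElem?_getD, List.getD_eq_getElem?_getD, List.getElem?_append_left hi]
    have hgetn : (xs ++ [x]).getD xs.length "" = x := by
      rw [List.getD_eq_getElem?_getD]
      simp
    have hkeylt : ∀ i : Nat, i < xs.length → pvKeyAt (xs ++ [x]) i = pvKeyAt xs i := by
      intro i hi; unfold pvKeyAt; rw [hgetlt i hi]
    have hkeyn : pvKeyAt (xs ++ [x]) xs.length =
        if pvIsContract x then some (PySem.Str.pyGet? x 1, PySem.Int.mod (xs.length : Int) 2)
        else none := by
      unfold pvKeyAt; rw [hgetn]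
    by_cases hc : pvIsContract x = true
    · -- the new bid is a contract bid: both sides restart flags; dict may gain the key
      have hB' : pvBState (xs ++ [x]) =
          (some (x, (xs.length : Int)), false, false,
            if ((pvBState xs).2.2.2.get? (PySem.Str.pyGet? x 1,
                PySem.Int.mod (xs.length : Int) 2)).isSome then (pvBState xs).2.2.2
            else (pvBState xs).2.2.2.insert (PySem.Str.pyGet? x 1,
                PySem.Int.mod (xs.length : Int) 2) (xs.length : Int)) := by
        rw [hn]; unfold pvStep
        rw [pvStep_contract_eq]
        simp [hc]
      unfold pvInv
      rw [hA, if_pos hc, hB']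
      refine ⟨rfl, rfl, rfl, fun k => ?_, ?_⟩
      · -- the first-seen table after a contract bid
        have hlen : (xs ++ [x]).length = xs.length + 1 := by simp
        rw [hlen, List.range_succ, List.find?_append,
          pvFind?_congr _ _ (fun i => pvKeyAt xs i == some k)
            (fun i hi => by rw [hkeylt i (List.mem_range.mp hi)])]
        by_cases hk : k = (PySem.Str.pyGet? x 1, PySem.Int.mod (xs.length : Int) 2)
        · subst hk
          cases hget : (pvBState xs).2.2.2.get? (PySem.Str.pyGet? x 1,
              PySem.Int.mod (xs.length : Int) 2) with
          | some v =>
            rw [ihd] at hget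
            simp only [hget, Option.isSome_some, if_true, ihd]
            cases hfind : List.find? (fun i => pvKeyAt xs i ==
                some (PySem.Str.pyGet? x 1, PySem.Int.mod (xs.length : Int) 2))
                (List.range xs.length) with
            | some j => rw [hfind] at hget; simp at hget; simp [hget]
            | none => rw [hfind] at hget; simp at hget
          | none =>
            rw [ihd] at hget
            simp only [Option.isSome_none, Bool.false_eq_true, if_false]
            rw [PySem.Dict.get?_insert_self]
            cases hfind : List.find? (fun i => pvKeyAt xs i ==
                some (PySem.Str.pyGet? x 1, PySem.Int.mod (xs.length : Int) 2))
                (List.range xs.length) with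
            | some j => rw [hfind] at hget; simp at hget
            | none => simp [hfind, hkeyn, hc]
        · have hne : ((if ((pvBState xs).2.2.2.get? (PySem.Str.pyGet? x 1,
              PySem.Int.mod (xs.length : Int) 2)).isSome then (pvBState xs).2.2.2
              else (pvBState xs).2.2.2.insert (PySem.Str.pyGet? x 1,
                PySem.Int.mod (xs.length : Int) 2) (xs.length : Int)).get? k
              = (pvBState xs).2.2.2.get? k) := by
            split
            · rfl
            · exact PySem.Dict.get?_insert_of_ne _ _ hk
          rw [hne, ihd]
          have hbeq : (pvKeyAt (xs ++ [x]) xs.length == some k) = false := by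
            rw [hkeyn, if_pos hc]
            apply beq_eq_false_iff_ne.mpr
            intro h; injection h with h'; exact hk h'.symm
          rw [List.find?_singleton, hbeq]
          cases List.find? (fun i => pvKeyAt xs i == some k) (List.range xs.length) <;> rfl
      · -- the last-contract facts
        intro c L h
        have h2 : some (x, (xs.length : Int)) = some (c, L) := h
        injection h2 with h'
        injection h' with hcx hL
        refine ⟨xs.length, hL.symm, by simp, by rw [hgetn, hcx], by rw [hcx] at hc; exact hc,
          fun i h1 h2 => by simp at h2; omega⟩
    · -- not a contract bid: flags may be set, dict and contract unchanged
      have hB' : pvBState (xs ++ [x]) =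
          (if x == "X" then ((pvBState xs).1, true, (pvBState xs).2.2.1, (pvBState xs).2.2.2)
           else if x == "XX" then ((pvBState xs).1, (pvBState xs).2.1, true, (pvBState xs).2.2.2)
           else pvBState xs) := by
        rw [hn]; unfold pvStep
        rw [pvStep_contract_eq]
        simp [hc]
      have hbound : ∀ i ∈ (PySem.List.pyRange 0 (xs.length : Int) 1).reverse,
          0 ≤ i ∧ i < (xs.length : Int) := by
        intro i hi
        rw [List.mem_reverse, PySem.List.mem_pyRange_one] at hi
        exact hi
      have hAx : pvAState (xs ++ [x]) =
          ((pvAState xs).1,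
            (if x == "X" then true else false) || (pvAState xs).2.1,
            (if x == "XX" then true else false) || (pvAState xs).2.2) := by
        rw [hA, if_neg hc, pvRevScan_append xs x _ hbound, pvRevScan_flags]
        rfl
      unfold pvInv
      have hdict : ∀ k, (pvBState xs).2.2.2.get? k =
          (List.find? (fun i => pvKeyAt (xs ++ [x]) i == some k)
            (List.range (xs ++ [x]).length)).map (fun i => (i : Int)) := by
        intro k
        have hlen : (xs ++ [x]).length = xs.length + 1 := by simp
        rw [hlen, List.range_succ, List.find?_append,
          pvFind?_congr _ _ (fun i => pvKeyAt xs i == some k)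
            (fun i hi => by rw [hkeylt i (List.mem_range.mp hi)])]
        have hnone : List.find? (fun i => pvKeyAt (xs ++ [x]) i == some k) [xs.length]
            = none := by simp [hkeyn, hc]
        rw [hnone, ihd]
        cases List.find? (fun i => pvKeyAt xs i == some k) (List.range xs.length) <;> rfl
      have hlast : ∀ c L, (pvBState xs).1 = some (c, L) → ∃ Ln : Nat, L = (Ln : Int) ∧
          Ln < (xs ++ [x]).length ∧ (xs ++ [x]).getD Ln "" = c ∧ pvIsContract c = true ∧
          ∀ i : Nat, Ln < i → i < (xs ++ [x]).length → pvIsContract ((xs ++ [x]).getD i "") = false := by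
        intro c L h
        obtain ⟨Ln, hL, hlt, hget, hcc, hafter⟩ := ihL c L h
        refine ⟨Ln, hL, by simp; omega, by rw [hgetlt Ln hlt]; exact hget, hcc, ?_⟩
        intro i h1 h2
        simp at h2
        rcases Nat.lt_or_ge i xs.length with hi | hi
        · rw [hgetlt i hi]; exact hafter i h1 hi
        · have : i = xs.length := by omega
          rw [this, hgetn]
          simpa using hc
      by_cases hx : x = "X"
      · have hB2 : pvBState (xs ++ [x]) =
            ((pvBState xs).1, true, (pvBState xs).2.2.1, (pvBState xs).2.2.2) := by
          rw [hB']; simp [hx]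
        have hA2 : pvAState (xs ++ [x]) = ((pvAState xs).1, true, (pvAState xs).2.2) := by
          rw [hAx]; simp [hx]
        rw [hB2, hA2]
        exact ⟨ih1, rfl, ih3, hdict, hlast⟩
      · by_cases hxx : x = "XX"
        · have hB2 : pvBState (xs ++ [x]) =
              ((pvBState xs).1, (pvBState xs).2.1, true, (pvBState xs).2.2.2) := by
            rw [hB']; simp [hx, hxx]
          have hA2 : pvAState (xs ++ [x]) = ((pvAState xs).1, (pvAState xs).2.1, true) := by
            rw [hAx]; simp [hx, hxx]
          rw [hB2, hA2]
          exact ⟨ih1, ih2, rfl, hdict, hlast⟩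
        · have hB2 : pvBState (xs ++ [x]) = pvBState xs := by
            rw [hB']; simp [hx, hxx]
          have hA2 : pvAState (xs ++ [x]) =
              ((pvAState xs).1, (pvAState xs).2.1, (pvAState xs).2.2) := by
            rw [hAx]; simp [hx, hxx]
          rw [hB2, hA2]
          exact ⟨ih1, ih2, ih3, hdict, hlast⟩

-- A's declarer loop is a find? over the index list
theorem pvFwdScan_eq_find? (xs : List String) (c : String) (L : Int) (idxs : List Int) :
    pvFwdScan xs c L idxs =
      idxs.find? (fun i => pvIsContract (PySem.List.pyGetD xs i "") &&
        decide (PySem.Int.mod (i + L) 2 = 0) &&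
        (PySem.Str.pyGet? (PySem.List.pyGetD xs i "") 1 == PySem.Str.pyGet? c 1)) := by
  induction idxs with
  | nil => rfl
  | cons i rest ih =>
    simp only [pvFwdScan, List.find?_cons]
    by_cases hc : pvIsContract (PySem.List.pyGetD xs i "") = true
    · have hm : PySem.Int.mod (i + L) 2 = (i + L) % 2 :=
        PySem.Int.mod_eq_emod_of_pos (by norm_num)
      by_cases hpar : PySem.Int.mod (i + L) 2 = 0
      · rw [hm] at hpar
        by_cases hch : PySem.List.pyGet? (PySem.List.pyGetD xs i "").toList 1 = PySem.List.pyGet? c.toList 1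
        · have hb : (PySem.List.pyGet? (PySem.List.pyGetD xs i "").toList 1 ==
            PySem.List.pyGet? c.toList 1) = true := by simp [hch]
          simp [hc, hch, (by omega : (2 : Int) ∣ i + L)]
        · have hb : (PySem.List.pyGet? (PySem.List.pyGetD xs i "").toList 1 ==
            PySem.List.pyGet? c.toList 1) = false := by simp [hch]
          simp [hc, hch, hb, (by omega : ¬ (i + L) % 2 = 1), (by omega : (2:Int) ∣ i + L), ih]
      · rw [hm] at hpar
        simp [hc, (by omega : (i + L) % 2 = 1), (by omega : ¬ (2:Int) ∣ i + L), ih]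
    · simp [hc, ih]

-- ===== VERDICT (by name: the statement is the Claim_ definition above) =====
theorem pvDeclarer_eq (auction : List String) (c : String) (Ln : Nat)
    (hlt : Ln < auction.length) (hget : auction.getD Ln "" = c)
    (hcc : pvIsContract c = true)
    (hafter : ∀ i : Nat, Ln < i → i < auction.length → pvIsContract (auction.getD i "") = false) :
    pvFwdScan auction c (Ln : Int) (PySem.List.pyRange 0 ((Ln : Int) + 1) 1) =
      (List.find? (fun i => pvKeyAt auction i ==
        some (PySem.Str.pyGet? c 1, PySem.Int.mod (Ln : Int) 2))
        (List.range auction.length)).map (fun i => (i : Int)) := by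
  have hr : ((Ln : Int) + 1) = ((Ln + 1 : Nat) : Int) := by push_cast; ring
  rw [pvFwdScan_eq_find?, hr, PySem.List.pyRange_zero_natCast, List.find?_map]
  have hBside : List.find? (fun i => pvKeyAt auction i ==
        some (PySem.Str.pyGet? c 1, PySem.Int.mod (Ln : Int) 2)) (List.range auction.length)
      = List.find? (fun i => pvKeyAt auction i ==
        some (PySem.Str.pyGet? c 1, PySem.Int.mod (Ln : Int) 2)) (List.range (Ln + 1)) := by
    have hsplit : auction.length = (Ln + 1) + (auction.length - (Ln + 1)) := by omega
    conv_lhs => rw [hsplit]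
    rw [List.range_add, List.find?_append]
    have hnone : List.find? (fun i => pvKeyAt auction i ==
        some (PySem.Str.pyGet? c 1, PySem.Int.mod (Ln : Int) 2))
        ((List.range (auction.length - (Ln + 1))).map (fun j => Ln + 1 + j)) = none := by
      rw [List.find?_eq_none]
      intro a ha
      rw [List.mem_map] at ha
      obtain ⟨j, hj, rfl⟩ := ha
      rw [List.mem_range] at hj
      have hf : pvIsContract (auction.getD (Ln + 1 + j) "") = false :=
        hafter _ (by omega) (by omega)
      rw [List.getD_eq_getElem?_getD] at hf
      simp [pvKeyAt, hf]
    rw [hnone, Option.or_none]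
  rw [hBside, pvFind?_congr _ _ (fun i => pvKeyAt auction i ==
      some (PySem.Str.pyGet? c 1, PySem.Int.mod (Ln : Int) 2)) ?_]
  · cases List.find? _ (List.range (Ln + 1)) <;> rfl
  · intro i _
    simp only [Function.comp]
    have hpair : ∀ (a b : Option Char) (cc dd : Int),
        ((a, cc) == (b, dd)) = (a == b && cc == dd) := fun _ _ _ _ => rfl
    by_cases hic : pvIsContract (auction[i]?.getD "" : String) = true
    · have hm1 : PySem.Int.mod ((i : Int) + (Ln : Int)) 2 = ((i : Int) + (Ln : Int)) % 2 :=
        PySem.Int.mod_eq_emod_of_pos (by norm_num)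
      have hm2 : PySem.Int.mod (i : Int) 2 = (i : Int) % 2 :=
        PySem.Int.mod_eq_emod_of_pos (by norm_num)
      have hm3 : PySem.Int.mod (Ln : Int) 2 = (Ln : Int) % 2 :=
        PySem.Int.mod_eq_emod_of_pos (by norm_num)
      by_cases hch : PySem.List.pyGet? ((auction[i]?.getD "" : String)).toList 1
          = PySem.List.pyGet? c.toList 1
      · by_cases hp : ((i : Int) + (Ln : Int)) % 2 = 0
        · have hpp : (i : Int) % 2 = (Ln : Int) % 2 := by omega
          simp [pvKeyAt, hpair, hic, hch, hp, hpp]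
        · have hpp : ¬ (i : Int) % 2 = (Ln : Int) % 2 := by omega
          simp [pvKeyAt, hpair, hic, hch, hp, hpp]
      · have hb : (PySem.List.pyGet? ((auction[i]?.getD "" : String)).toList 1
            == PySem.List.pyGet? c.toList 1) = false := beq_eq_false_iff_ne.mpr hch
        simp [pvKeyAt, hpair, hic, hb]
    · simp [pvKeyAt, hic]

theorem get_contract_spec : Claim_equal_get_contract := by
  intro auction _dom _pre
  unfold Spec_get_contract
  obtain ⟨h1, h2, h3, hdict, hlast⟩ := pvInv_holds auction
  have hA : get_contract auction = (match (pvAState auction).1 with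
      | none => none
      | some (contract, last_bid_i) =>
        some (contract ++
          (if !(pvAState auction).2.1 then "" else if !(pvAState auction).2.2 then "X" else "XX") ++
          PySem.List.pyGetD ["N", "E", "S", "W"] (PySem.Int.mod
            ((pvFwdScan auction contract last_bid_i
              (PySem.List.pyRange 0 (last_bid_i + 1) 1)).getD 0) 4) "")) := rfl
  have hB : get_contract_alt auction = (match (pvBState auction).1 with
      | none => none
      | some (contract, last_bid_i) =>
        some (contract ++
          (if (pvBState auction).2.1 && !(pvBState auction).2.2.1 then "X"
            else if (pvBState auction).2.1 && (pvBState auction).2.2.1 then "XX" else "") ++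
          PySem.List.pyGetD pvSeats (PySem.Int.mod
            (((pvBState auction).2.2.2.get? (PySem.Str.pyGet? contract 1,
              PySem.Int.mod last_bid_i 2)).getD 0) 4) "")) := rfl
  rw [hA, hB, h1]
  cases hres : (pvAState auction).1 with
  | none => rfl
  | some cl =>
    obtain ⟨c, L⟩ := cl
    simp only
    obtain ⟨Ln, rfl, hlt, hget, hcc, hafter⟩ := hlast c L (h1.trans hres)
    have hdecl : pvFwdScan auction c (Ln : Int) (PySem.List.pyRange 0 ((Ln : Int) + 1) 1)
        = (pvBState auction).2.2.2.get? (PySem.Str.pyGet? c 1, PySem.Int.mod (Ln : Int) 2) := by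
      rw [pvDeclarer_eq auction c Ln hlt hget hcc hafter, hdict]
    rw [hdecl, h2, h3]
    have hxx : (if !(pvAState auction).2.1 then ""
          else if !(pvAState auction).2.2 then "X" else "XX")
        = (if (pvAState auction).2.1 && !(pvAState auction).2.2 then "X"
          else if (pvAState auction).2.1 && (pvAState auction).2.2 then "XX" else "") := by
      cases (pvAState auction).2.1 <;> cases (pvAState auction).2.2 <;> rfl
    rw [hxx]
    rfl
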